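-- pv_equiv track=rewrite | github.com/ksaikiran2606/Python-practice | ClosetPrimeNum.py | closet_prime
-- ===== SOURCE A (Python) =====
-- def prime_number(num):
--     count = 0
--     for i in range(1,num+1):
--         if num % i == 0:
--             count += 1
--     if count == 2:
--         return True
--     else:
--         return False
--
-- def closet_prime(num):
--     front = num
--     back  = num-1
--     while True:
--         if (prime_number(front)):
--             return front
--         elif (prime_number(back)):
--             return back
--         front = front + 1
--         back  = back  - 1
-- ===== SOURCE B (Python) =====
-- def is_prime(n):
--     return n >= 2 and all(n % d for d in range(2, n))
--
-- def closet_prime(num):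
--     p_low = next((i for i in range(num, 1, -1) if is_prime(i)), None)
--     p_high = num + 1
--     while not is_prime(p_high):
--         p_high += 1
--     if p_low is None or p_high - num < num - p_low:
--         return p_high
--     return p_low
-- ===== Notes on version B (the rewrite author's own statement) =====
-- stated objective: alternative
-- what changed: Replaces A's single interleaved two-directional scan (checking front then back each iteration) by two independent directional passes -- nearest prime <= num via a downward scan, nearest prime > num via an upward scan -- combined with an explicit distance comparison whose strict '<' reproduces A's tie-to-the-lower rule.
import Mathlib
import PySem

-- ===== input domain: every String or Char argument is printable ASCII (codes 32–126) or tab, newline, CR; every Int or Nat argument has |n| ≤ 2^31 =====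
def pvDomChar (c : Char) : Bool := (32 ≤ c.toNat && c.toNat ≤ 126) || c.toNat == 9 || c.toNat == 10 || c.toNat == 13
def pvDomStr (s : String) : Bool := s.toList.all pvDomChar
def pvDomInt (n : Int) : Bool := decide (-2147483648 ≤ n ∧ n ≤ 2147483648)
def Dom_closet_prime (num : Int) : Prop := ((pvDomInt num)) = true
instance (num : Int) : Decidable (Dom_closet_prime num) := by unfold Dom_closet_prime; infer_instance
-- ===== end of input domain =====

-- B replaces A's single two-directional interleaved scan by two independent directional
-- passes (nearest prime ≤ num, nearest prime > num) combined by an explicit distance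
-- comparison; objective: alternative decomposition, same exact values.
-- The `fuel` parameter of each loop is only a totalization guard for Python's unbounded
-- loop: the lemma find_lt_fuel below proves it is never exhausted (a prime is always
-- reached first), so each port loops exactly as its Python does.

-- ===== PORT A =====
def prime_number (num : Int) : Bool :=
  let count : Int := (PySem.List.pyRange 1 (num + 1) 1).foldl
      (fun count i => if PySem.Int.mod num i == 0 then count + 1 else count) 0
  if count == 2 then true else false

def closetLoop (fuel : Nat) (front back : Int) : Int :=
  match fuel with
  | 0 => front  -- never reached (see find_lt_fuel below)
  | f + 1 =>
      if prime_number front then front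
      else if prime_number back then back
      else closetLoop f (front + 1) (back - 1)

def closet_prime (num : Int) : Int := closetLoop (3 * num.natAbs + 8) num (num - 1)

-- ===== PORT B =====
def is_prime (n : Int) : Bool :=
  decide (2 ≤ n) && (PySem.List.pyRange 2 n 1).all (fun d => !(PySem.Int.mod n d == 0))

def closetUp (fuel : Nat) (c : Int) : Int :=
  match fuel with
  | 0 => c  -- never reached (see find_lt_fuel below)
  | f + 1 => if is_prime c then c else closetUp f (c + 1)

def closet_prime_alt (num : Int) : Int :=
  let p_low := (PySem.List.pyRange num 1 (-1)).find? is_prime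
  let p_high := closetUp (3 * (num + 1).natAbs + 8) (num + 1)
  match p_low with
  | none => p_high
  | some l => if p_high - num < num - l then p_high else l

-- ===== PRECONDITION & SPEC =====
def Spec_closet_prime (num : Int) (out : Int) : Prop := out = closet_prime_alt num
instance (num : Int) (out : Int) : Decidable (Spec_closet_prime num out) := by unfold Spec_closet_prime; infer_instance

-- ===== CLAIM (what is proved, stated in full; the proofs are below) =====
def Claim_equal_closet_prime : Prop := ∀ (num : Int), Dom_closet_prime num → Spec_closet_prime num (closet_prime num)

-- ===== LEMMAS AND PROOFS =====

theorem foldl_count (P : Int → Bool) (l : List Int) (c : Int) :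
    l.foldl (fun c i => if P i then c + 1 else c) c = c + (l.countP P : Int) := by
  induction l generalizing c with
  | nil => simp
  | cons x t ih =>
      rw [List.foldl_cons, List.countP_cons, ih]
      by_cases h : P x <;> simp [h] <;> push_cast <;> omega

theorem isPrime_of_prime (p : Nat) (hp : Nat.Prime p) : is_prime (p : Int) = true := by
  have h2 : (2 : Int) ≤ (p : Int) := by exact_mod_cast hp.two_le
  unfold is_prime
  rw [Bool.and_eq_true]
  refine ⟨decide_eq_true h2, ?_⟩
  rw [List.all_eq_true]
  intro d hd
  rw [PySem.List.mem_pyRange_one] at hd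
  simp only [Bool.not_eq_eq_eq_not, Bool.not_true, beq_eq_false_iff_ne, ne_eq]
  intro hmod
  have hdvd : d ∣ (p : Int) := (PySem.Int.mod_eq_zero_iff_dvd _ _).mp hmod
  have hic : ((d.toNat : Int)) = d := Int.toNat_of_nonneg (by omega)
  have hdn : d.toNat ∣ p := by
    rw [← Int.natCast_dvd_natCast]
    rwa [hic]
  rcases hp.eq_one_or_self_of_dvd _ hdn with h1 | h1 <;> omega

theorem is_prime_exists_ge (n : Int) : ∃ k : Nat, is_prime (n + k) = true := by
  obtain ⟨p, hpge, hp⟩ := Nat.exists_infinite_primes (max n 2).toNat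
  have h2 : (2 : Int) ≤ (p : Int) := by exact_mod_cast hp.two_le
  have hml : n ≤ max n 2 := le_max_left _ _
  have hmt : (max n 2) ≤ ((max n 2).toNat : Int) := Int.self_le_toNat _
  have hpc : ((max n 2).toNat : Int) ≤ (p : Int) := by exact_mod_cast hpge
  refine ⟨((p : Int) - n).toNat, ?_⟩
  have hkey : n + (((p : Int) - n).toNat : Int) = (p : Int) := by omega
  rw [hkey]
  exact isPrime_of_prime p hp

-- the position of the first prime ≥ c
def nextP (c : Int) : Int := c + (Nat.find (is_prime_exists_ge c) : Int)

theorem prime_eq (n : Int) : prime_number n = is_prime n := by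
  by_cases h2 : 2 ≤ n
  · have hm1 : PySem.Int.mod n 1 = 0 := (PySem.Int.mod_eq_zero_iff_dvd _ _).mpr (one_dvd _)
    have hmn : PySem.Int.mod n n = 0 := (PySem.Int.mod_eq_zero_iff_dvd _ _).mpr dvd_rfl
    have key : ((PySem.List.pyRange 2 n 1).countP (fun i => PySem.Int.mod n i == 0) = 0)
        ↔ ((PySem.List.pyRange 2 n 1).all (fun d => !(PySem.Int.mod n d == 0)) = true) := by
      rw [List.countP_eq_zero, List.all_eq_true]
      simp
    have hcnt : (PySem.List.pyRange 1 (n + 1) 1).countP (fun i => PySem.Int.mod n i == 0)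
        = (PySem.List.pyRange 2 n 1).countP (fun i => PySem.Int.mod n i == 0) + 2 := by
      rw [PySem.List.pyRange_one_cons (by omega : (1 : Int) < n + 1),
        show (1 : Int) + 1 = 2 by norm_num,
        PySem.List.pyRange_one_succ_right (by omega : (2 : Int) ≤ n)]
      simp [List.countP_append, hmn]
    rw [Bool.eq_iff_iff]
    unfold prime_number is_prime
    rw [foldl_count, hcnt]
    simp only [Bool.and_eq_true, decide_eq_true_eq]
    constructor
    · intro h
      refine ⟨h2, key.mp ?_⟩
      split_ifs at h with hc
      rw [beq_iff_eq] at hc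
      omega
    · rintro ⟨-, hall⟩
      rw [key.mpr hall]
      norm_num
  · by_cases h1 : n = 1
    · subst h1; decide
    · have hn0 : n + 1 ≤ 1 := by omega
      simp [prime_number, is_prime, PySem.List.pyRange_one_eq_nil hn0, h2]

theorem isPrime_two_le {n : Int} (h : is_prime n = true) : 2 ≤ n := by
  unfold is_prime at h
  rw [Bool.and_eq_true] at h
  exact of_decide_eq_true h.1

theorem find_pos {c : Int} (h : is_prime c = false) :
    0 < Nat.find (is_prime_exists_ge c) := by
  rcases Nat.eq_zero_or_pos (Nat.find (is_prime_exists_ge c)) with hp | hp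
  swap
  · exact hp
  · have hs := Nat.find_spec (is_prime_exists_ge c)
    rw [hp] at hs
    simp at hs
    rw [hs] at h
    cases h

theorem find_succ {c : Int} (h : is_prime c = false) :
    Nat.find (is_prime_exists_ge (c + 1)) = Nat.find (is_prime_exists_ge c) - 1 := by
  have hpos := find_pos h
  apply le_antisymm
  · apply Nat.find_le
    have he : c + 1 + ((Nat.find (is_prime_exists_ge c) - 1 : Nat) : Int)
        = c + (Nat.find (is_prime_exists_ge c) : Int) := by push_cast; omega
    rw [he]
    exact Nat.find_spec (is_prime_exists_ge c)
  · have hle : Nat.find (is_prime_exists_ge c) ≤ Nat.find (is_prime_exists_ge (c + 1)) + 1 := by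
      apply Nat.find_le
      have he : c + ((Nat.find (is_prime_exists_ge (c + 1)) + 1 : Nat) : Int)
          = c + 1 + (Nat.find (is_prime_exists_ge (c + 1)) : Int) := by push_cast; omega
      rw [he]
      exact Nat.find_spec (is_prime_exists_ge (c + 1))
    omega

theorem nextP_self {c : Int} (h : is_prime c = true) : nextP c = c := by
  unfold nextP
  have : Nat.find (is_prime_exists_ge c) = 0 := by
    rw [Nat.find_eq_zero]
    simpa using h
  rw [this]
  simp

theorem nextP_shift {c : Int} (h : is_prime c = false) : nextP (c + 1) = nextP c := by
  unfold nextP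
  rw [find_succ h]
  have := find_pos h
  push_cast [Nat.cast_sub (by omega : 1 ≤ Nat.find (is_prime_exists_ge c))]
  ring

theorem nextP_ge (c : Int) : c ≤ nextP c := by
  unfold nextP
  have : (0 : Int) ≤ (Nat.find (is_prime_exists_ge c) : Int) := by positivity
  omega

theorem nextP_gt {c : Int} (h : is_prime c = false) : c + 1 ≤ nextP c := by
  rw [← nextP_shift h]
  exact nextP_ge (c + 1)

theorem find_lt_fuel (n : Int) : Nat.find (is_prime_exists_ge n) < 3 * n.natAbs + 8 := by
  obtain ⟨p, hp, hlt, hub⟩ := Nat.bertrand (n.toNat + 2) (by omega)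
  have h2 : (2 : Int) ≤ (p : Int) := by exact_mod_cast hp.two_le
  have hltI : ((n.toNat + 2 : Nat) : Int) < (p : Int) := by exact_mod_cast hlt
  have hubI : (p : Int) ≤ ((2 * (n.toNat + 2) : Nat) : Int) := by exact_mod_cast hub
  have hge : n ≤ (p : Int) := by
    have := Int.self_le_toNat n
    push_cast at hltI
    omega
  have hfind : Nat.find (is_prime_exists_ge n) ≤ ((p : Int) - n).toNat := by
    apply Nat.find_le
    have he : n + ((((p : Int) - n).toNat : Nat) : Int) = (p : Int) := by omega
    rw [he]
    exact isPrime_of_prime p hp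
  have hb : (((p : Int) - n).toNat : Int) < 3 * (n.natAbs : Int) + 8 := by
    push_cast at hubI
    have h1 : (n.toNat : Int) ≤ (n.natAbs : Int) := by omega
    omega
  omega

theorem closetUp_eq (fuel : Nat) (c : Int)
    (h : Nat.find (is_prime_exists_ge c) < fuel) : closetUp fuel c = nextP c := by
  induction fuel generalizing c with
  | zero => omega
  | succ f ih =>
      rw [closetUp]
      cases hip : is_prime c with
      | true => simp [hip, nextP_self hip]
      | false =>
          simp only [hip, Bool.false_eq_true, if_false]
          rw [ih (c + 1) (by rw [find_succ hip]; have := find_pos hip; omega)]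
          exact nextP_shift hip

theorem fd_nil (n : Int) (h : n ≤ 1) :
    (PySem.List.pyRange n 1 (-1)).find? is_prime = none := by
  rw [PySem.List.pyRange_neg_one_eq_nil h]; rfl

theorem fd_cons (n : Int) (h : 2 ≤ n) :
    (PySem.List.pyRange n 1 (-1)).find? is_prime =
      if is_prime n then some n else (PySem.List.pyRange (n - 1) 1 (-1)).find? is_prime := by
  rw [PySem.List.pyRange_neg_one_cons (by omega : (1:Int) < n)]
  cases h' : is_prime n <;> simp [List.find?_cons, h']

theorem fd_bounds {n l : Int}
    (h : (PySem.List.pyRange n 1 (-1)).find? is_prime = some l) : 1 < l ∧ l ≤ n := by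
  have hm := List.mem_of_find?_eq_some h
  rwa [PySem.List.mem_pyRange_neg_one] at hm

theorem closetLoop_eq (fuel : Nat) (front back : Int)
    (h : Nat.find (is_prime_exists_ge front) < fuel) :
    closetLoop fuel front back =
      match (PySem.List.pyRange back 1 (-1)).find? is_prime with
      | none => nextP front
      | some l => if nextP front - front ≤ back - l then nextP front else l := by
  induction fuel generalizing front back with
  | zero => omega
  | succ f ih =>
      rw [closetLoop]
      cases hf : is_prime front with
      | true =>
          rw [prime_eq front, hf]
          simp only [if_true]
          rw [nextP_self hf]
          cases hfd : (PySem.List.pyRange back 1 (-1)).find? is_prime with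
          | none => rfl
          | some l =>
              have hb := fd_bounds hfd
              simp only []
              rw [if_pos (by omega)]
      | false =>
          rw [prime_eq front, hf]
          simp only [Bool.false_eq_true, if_false]
          have hgt := nextP_gt hf
          cases hbk : is_prime back with
          | true =>
              rw [prime_eq back, hbk]
              simp only [if_true]
              have hb2 : 2 ≤ back := isPrime_two_le hbk
              have hfd : (PySem.List.pyRange back 1 (-1)).find? is_prime = some back := by
                rw [fd_cons back hb2, if_pos hbk]
              rw [hfd]
              simp only []
              rw [if_neg (by omega)]
          | false =>
              rw [prime_eq back, hbk]
              simp only [Bool.false_eq_true, if_false]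
              rw [ih (front + 1) (back - 1)
                (by rw [find_succ hf]; have := find_pos hf; omega)]
              rw [nextP_shift hf]
              have hfd : (PySem.List.pyRange (back - 1) 1 (-1)).find? is_prime
                  = (PySem.List.pyRange back 1 (-1)).find? is_prime := by
                by_cases hb : 2 ≤ back
                · rw [fd_cons back hb, if_neg (by simp [hbk])]
                · rw [fd_nil (back - 1) (by omega), fd_nil back (by omega)]
              rw [hfd]
              cases hfd2 : (PySem.List.pyRange back 1 (-1)).find? is_prime with
              | none => rfl
              | some l =>
                  simp only []
                  by_cases hc : nextP front - front ≤ back - l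
                  · rw [if_pos (by omega), if_pos hc]
                  · rw [if_neg (by omega), if_neg hc]

-- ===== VERDICT (by name: the statement is the Claim_ definition above) =====
theorem closet_prime_spec : Claim_equal_closet_prime := by
  unfold Claim_equal_closet_prime Spec_closet_prime
  intro num _
  unfold closet_prime closet_prime_alt
  rw [closetLoop_eq _ _ _ (find_lt_fuel num),
    closetUp_eq _ _ (by have := find_lt_fuel (num + 1); omega)]
  by_cases hp : is_prime num = true
  · have h2 : 2 ≤ num := isPrime_two_le hp
    have hfdn : (PySem.List.pyRange num 1 (-1)).find? is_prime = some num := by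
      rw [fd_cons num h2, if_pos hp]
    have hge : num + 1 ≤ nextP (num + 1) := nextP_ge _
    rw [hfdn, nextP_self hp]
    simp only []
    rw [if_neg (by omega)]
    cases hfd : (PySem.List.pyRange (num - 1) 1 (-1)).find? is_prime with
    | none => rfl
    | some l =>
        have hb := fd_bounds hfd
        simp only []
        rw [if_pos (by omega)]
  · have hpf : is_prime num = false := by simpa using hp
    have hup : nextP (num + 1) = nextP num := nextP_shift hpf
    have hfd : (PySem.List.pyRange num 1 (-1)).find? is_prime
        = (PySem.List.pyRange (num - 1) 1 (-1)).find? is_prime := by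
      by_cases hb : 2 ≤ num
      · rw [fd_cons num hb, if_neg (by simp [hpf])]
      · rw [fd_nil num (by omega), fd_nil (num - 1) (by omega)]
    rw [hfd, hup]
    cases hfd2 : (PySem.List.pyRange (num - 1) 1 (-1)).find? is_prime with
    | none => rfl
    | some l =>
        simp only []
        by_cases hc : nextP num - num ≤ num - 1 - l
        · rw [if_pos hc, if_pos (show nextP num - num < num - l by omega)]
        · rw [if_neg hc, if_neg (show ¬ nextP num - num < num - l by omega)]
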